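-- pv_equiv track=rewrite | github.com/superninjv/costa-os | cli-wrappers/steam/cli_anything_steam/cli.py | _tokenize_vdf
-- ===== SOURCE A (Python) =====
-- def _tokenize_vdf(text: str) -> list[str]:
--     """Tokenize VDF text into quoted strings and braces."""
--     tokens: list[str] = []
--     i = 0
--     length = len(text)
--     while i < length:
--         ch = text[i]
--         if ch in (" ", "\t", "\r", "\n"):
--             i += 1
--         elif ch == "/" and i + 1 < length and text[i + 1] == "/":
--             # Line comment — skip to end of line
--             while i < length and text[i] != "\n":
--                 i += 1
--         elif ch == '"':
--             # Quoted string
--             j = i + 1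
--             while j < length and text[j] != '"':
--                 if text[j] == "\\":
--                     j += 1  # skip escaped char
--                 j += 1
--             tokens.append(text[i + 1 : j])
--             i = j + 1
--         elif ch in ("{", "}"):
--             tokens.append(ch)
--             i += 1
--         else:
--             # Unquoted token (some VDF files use unquoted keys)
--             j = i
--             while j < length and text[j] not in (" ", "\t", "\r", "\n", '"', "{", "}"):
--                 j += 1
--             tokens.append(text[i:j])
--             i = j
--     return tokens
-- ===== SOURCE B (Python) =====
-- def _tokenize_vdf(text: str) -> list[str]:
--     """Tokenize VDF text into quoted strings and braces (stack-consumer lexer)."""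
--     tokens: list[str] = []
--     cs = list(text)[::-1]          # stack of characters; cs[-1] is the next char
--     while cs:
--         c = cs.pop()
--         if c in " \t\r\n":
--             continue
--         if c == "/" and cs and cs[-1] == "/":
--             # Line comment — drop chars until the newline (left on the stack)
--             while cs and cs[-1] != "\n":
--                 cs.pop()
--         elif c == '"':
--             # Quoted string
--             buf: list[str] = []
--             while cs:
--                 d = cs.pop()
--                 if d == '"':
--                     break
--                 buf.append(d)
--                 if d == "\\" and cs:
--                     buf.append(cs.pop())  # escaped char, taken verbatim
--             tokens.append("".join(buf))
--         elif c in "{}":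
--             tokens.append(c)
--         else:
--             # Unquoted token
--             buf = [c]
--             while cs and cs[-1] not in " \t\r\n\"{}":
--                 buf.append(cs.pop())
--             tokens.append("".join(buf))
--     return tokens
-- ===== Notes on version B (the rewrite author's own statement) =====
-- stated objective: alternative
-- what changed: B replaces A's index-arithmetic scanner (integer cursor plus inner position-scanning loops and slicing) with a stack-consumer lexer that pops characters off the front of the character list and collects tokens into local buffers, never touching an index.
import Mathlib
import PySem

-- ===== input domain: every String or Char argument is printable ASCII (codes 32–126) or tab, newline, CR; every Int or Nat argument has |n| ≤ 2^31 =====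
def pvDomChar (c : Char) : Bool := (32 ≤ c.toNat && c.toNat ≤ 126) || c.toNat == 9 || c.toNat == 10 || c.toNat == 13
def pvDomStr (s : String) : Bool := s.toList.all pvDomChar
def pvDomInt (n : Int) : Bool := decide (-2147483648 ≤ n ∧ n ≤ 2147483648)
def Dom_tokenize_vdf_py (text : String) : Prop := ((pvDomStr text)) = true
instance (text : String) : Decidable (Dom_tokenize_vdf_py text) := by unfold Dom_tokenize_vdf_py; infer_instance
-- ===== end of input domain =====

-- B lexes by consuming the text as a stack of characters (pop the head, gather into buffers) instead of
-- A's index arithmetic with inner position-scanning loops; objective: alternative decomposition, same cost.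

-- ===== PORT A =====
-- A reads text[i] only with 0 ≤ i < len, ported as (text.toList).getD i ' '; the counters i, j
-- start at 0 and are only incremented, so they are ported as Nat (they are never negative).
def pvIsWS (c : Char) : Bool := c = ' ' || c = '\t' || c = '\r' || c = '\n'
def pvIsDelim (c : Char) : Bool := pvIsWS c || c = '"' || c = '{' || c = '}'

-- inner loop `while i < length and text[i] != '\n': i += 1`
def pvCommentEnd (cs : List Char) (i : Nat) : Nat :=
  if h : i < cs.length ∧ cs.getD i ' ' ≠ '\n' then pvCommentEnd cs (i + 1) else i
termination_by cs.length - i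
decreasing_by omega

-- inner loop of the quoted-string branch (`j += 1` twice on a backslash)
def pvStringEnd (cs : List Char) (j : Nat) : Nat :=
  if h : j < cs.length ∧ cs.getD j ' ' ≠ '"' then
    if cs.getD j ' ' = '\\' then pvStringEnd cs (j + 2) else pvStringEnd cs (j + 1)
  else j
termination_by cs.length - j
decreasing_by all_goals omega

-- inner loop of the unquoted-token branch
def pvWordEnd (cs : List Char) (j : Nat) : Nat :=
  if h : j < cs.length ∧ pvIsDelim (cs.getD j ' ') = false then pvWordEnd cs (j + 1) else j
termination_by cs.length - j
decreasing_by omega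

-- bounds on the inner loops, cited by pvTokA's decreasing_by
theorem pvCommentEnd_ge (cs : List Char) : ∀ n k, cs.length - k ≤ n → k ≤ pvCommentEnd cs k := by
  intro n
  induction n with
  | zero => intro k h; rw [pvCommentEnd]; split <;> omega
  | succ n ih =>
    intro k h; rw [pvCommentEnd]; split
    · rename_i h'; exact le_trans (by omega) (ih (k + 1) (by omega))
    · omega

theorem pvCommentEnd_gt (cs : List Char) (i : Nat) (h1 : i < cs.length)
    (h2 : cs.getD i ' ' ≠ '\n') : i < pvCommentEnd cs i := by
  rw [pvCommentEnd, dif_pos (And.intro h1 h2)]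
  have h3 := pvCommentEnd_ge cs (cs.length - (i + 1)) (i + 1) le_rfl
  omega

theorem pvStringEnd_ge (cs : List Char) : ∀ n k, cs.length - k ≤ n → k ≤ pvStringEnd cs k := by
  intro n
  induction n with
  | zero => intro k h; rw [pvStringEnd]; split
            · rename_i h'; omega
            · omega
  | succ n ih =>
    intro k h; rw [pvStringEnd]; split
    · rename_i h'; split
      · exact le_trans (by omega) (ih (k + 2) (by omega))
      · exact le_trans (by omega) (ih (k + 1) (by omega))
    · omega

theorem pvWordEnd_ge (cs : List Char) : ∀ n k, cs.length - k ≤ n → k ≤ pvWordEnd cs k := by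
  intro n
  induction n with
  | zero => intro k h; rw [pvWordEnd]; split <;> omega
  | succ n ih =>
    intro k h; rw [pvWordEnd]; split
    · rename_i h'; exact le_trans (by omega) (ih (k + 1) (by omega))
    · omega

theorem pvWordEnd_gt (cs : List Char) (i : Nat) (h1 : i < cs.length)
    (h2 : pvIsDelim (cs.getD i ' ') = false) : i < pvWordEnd cs i := by
  rw [pvWordEnd, dif_pos (And.intro h1 h2)]
  have h3 := pvWordEnd_ge cs (cs.length - (i + 1)) (i + 1) le_rfl
  omega

theorem pv_not_delim (c : Char) (hw : ¬ pvIsWS c = true) (hq : c ≠ '"')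
    (hb : ¬(c = '{' ∨ c = '}')) : pvIsDelim c = false := by
  rw [Bool.not_eq_true] at hw
  simp only [pvIsDelim, hw, Bool.false_or, Bool.or_eq_false_iff, decide_eq_false_iff_not]
  exact ⟨⟨hq, fun hx => hb (Or.inl hx)⟩, fun hx => hb (Or.inr hx)⟩

def pvTokA (cs : List Char) (i : Nat) (tokens : List String) : List String :=
  if h : i < cs.length then
    let ch := cs.getD i ' '
    if hw : pvIsWS ch then pvTokA cs (i + 1) tokens
    else if hc : ch = '/' ∧ i + 1 < cs.length ∧ cs.getD (i + 1) ' ' = '/' then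
      pvTokA cs (pvCommentEnd cs i) tokens
    else if hq : ch = '"' then
      let j := pvStringEnd cs (i + 1)
      -- text[i+1 : j]: both bounds nonnegative and in order, so the slice is exactly take∘drop
      pvTokA cs (j + 1) (tokens ++ [String.mk ((cs.drop (i + 1)).take (j - (i + 1)))])
    else if hb : ch = '{' ∨ ch = '}' then
      pvTokA cs (i + 1) (tokens ++ [String.mk [ch]])
    else
      let j := pvWordEnd cs i
      pvTokA cs j (tokens ++ [String.mk ((cs.drop i).take (j - i))])
  else tokens
termination_by cs.length - i
decreasing_by
  · omega
  · have h1 : cs.getD i ' ' = '/' := hc.1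
    have := pvCommentEnd_gt cs i h (by rw [h1]; decide)
    omega
  · have := pvStringEnd_ge cs (cs.length - (i + 1)) (i + 1) le_rfl
    omega
  · omega
  · have := pvWordEnd_gt cs i h (pv_not_delim _ hw hq hb)
    omega

def tokenize_vdf_py (text : String) : List String := pvTokA text.toList 0 []

-- ===== PORT B =====
-- the comment loop: pop characters until the next one is '\n' (which stays on the stack)
def pvSkipC : List Char → List Char
  | [] => []
  | d :: t => if d = '\n' then d :: t else pvSkipC t

-- the quoted-string loop: returns (buf, remaining stack)
def pvQStr (acc : List Char) : List Char → List Char × List Char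
  | [] => (acc, [])
  | d :: t =>
    if d = '"' then (acc, t)
    else if d = '\\' then
      match t with
      | [] => (acc ++ ['\\'], [])
      | e :: t' => pvQStr (acc ++ ['\\', e]) t'
    else pvQStr (acc ++ [d]) t

theorem pvQStr_nil (acc : List Char) : pvQStr acc [] = (acc, []) := rfl

theorem pvQStr_cons (acc : List Char) (d : Char) (t : List Char) :
    pvQStr acc (d :: t) =
      if d = '"' then (acc, t)
      else if d = '\\' then
        match t with
        | [] => (acc ++ ['\\'], [])
        | e :: t' => pvQStr (acc ++ ['\\', e]) t'
      else pvQStr (acc ++ [d]) t := by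
  conv_lhs => rw [pvQStr.eq_def]

-- the unquoted-token loop: pop characters while the next is not a delimiter
def pvSpanW : List Char → List Char × List Char
  | [] => ([], [])
  | d :: t =>
    if pvIsDelim d then ([], d :: t)
    else
      let p := pvSpanW t
      (d :: p.1, p.2)

-- the loops only consume the stack, cited by pvTokB's decreasing_by
theorem pvSkipC_le (l : List Char) : (pvSkipC l).length ≤ l.length := by
  induction l with
  | nil => simp [pvSkipC]
  | cons d t ih => rw [pvSkipC]; split
                   · simp
                   · simp; omega

theorem pvQStr_le : ∀ (n : Nat) (l acc : List Char), l.length ≤ n → (pvQStr acc l).2.length ≤ l.length := by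
  intro n
  induction n with
  | zero =>
    intro l acc h
    have : l = [] := List.eq_nil_of_length_eq_zero (by omega)
    simp [this, pvQStr_nil]
  | succ n ih =>
    intro l acc h
    cases l with
    | nil => simp [pvQStr_nil]
    | cons d t =>
      rw [pvQStr_cons]; split
      · simp
      · split
        · cases t with
          | nil => simp
          | cons e t' =>
            have := ih t' (acc ++ ['\\', e]) (by simp at h ⊢; omega)
            simp at this ⊢; omega
        · have := ih t (acc ++ [d]) (by simp at h; omega)
          simp at this ⊢; omega

theorem pvSpanW_le (l : List Char) : (pvSpanW l).2.length ≤ l.length := by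
  induction l with
  | nil => simp [pvSpanW]
  | cons d t ih => rw [pvSpanW]; split
                   · simp
                   · simp; omega

def pvTokB : List Char → List String
  | [] => []
  | c :: rest =>
    if pvIsWS c then pvTokB rest
    else if c = '/' ∧ rest.head? = some '/' then pvTokB (pvSkipC rest)
    else if c = '"' then
      let p := pvQStr [] rest
      String.mk p.1 :: pvTokB p.2
    else if c = '{' ∨ c = '}' then String.mk [c] :: pvTokB rest
    else
      let p := pvSpanW rest
      String.mk (c :: p.1) :: pvTokB p.2
termination_by cs => cs.length
decreasing_by
  · simp
  · have := pvSkipC_le rest; simp; omega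
  · have := pvQStr_le rest.length rest [] le_rfl; simp; omega
  · simp
  · have := pvSpanW_le rest; simp; omega

def tokenize_vdf_py_alt (text : String) : List String := pvTokB text.toList

-- ===== PRECONDITION & SPEC =====
def Spec_tokenize_vdf_py (text : String) (out : List String) : Prop := out = tokenize_vdf_py_alt text
instance (text : String) (out : List String) : Decidable (Spec_tokenize_vdf_py text out) := by unfold Spec_tokenize_vdf_py; infer_instance

-- ===== CLAIM (what is proved, stated in full; the proofs are below) =====
def Claim_equal_tokenize_vdf_py : Prop := ∀ (text : String), Dom_tokenize_vdf_py text → Spec_tokenize_vdf_py text (tokenize_vdf_py text)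

-- ===== LEMMAS AND PROOFS =====
theorem pv_getD_pos (cs : List Char) (k : Nat) (h : k < cs.length) : cs.getD k ' ' = cs[k] := by
  simp [List.getD, List.getElem?_eq_getElem h]

theorem pv_skipC_drop (cs : List Char) : ∀ n k, cs.length - k ≤ n →
    pvSkipC (cs.drop k) = cs.drop (pvCommentEnd cs k) := by
  intro n
  induction n with
  | zero =>
    intro k h
    have hk : cs.length ≤ k := by omega
    rw [List.drop_of_length_le hk, pvCommentEnd]
    rw [dif_neg (by omega)]
    simp [pvSkipC, List.drop_of_length_le hk]
  | succ n ih =>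
    intro k h
    by_cases hk : k < cs.length
    · have hd : cs.drop k = cs[k] :: cs.drop (k + 1) := List.drop_eq_getElem_cons hk
      rw [hd, pvSkipC, pvCommentEnd]
      by_cases hnl : cs[k] = '\n'
      · rw [if_pos hnl, dif_neg (by rw [pv_getD_pos cs k hk]; simp [hnl])]
        rw [← hd]
      · rw [if_neg hnl, dif_pos ⟨hk, by rw [pv_getD_pos cs k hk]; simp [hnl]⟩]
        exact ih (k + 1) (by omega)
    · have hk' : cs.length ≤ k := by omega
      rw [List.drop_of_length_le hk', pvCommentEnd, dif_neg (by omega)]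
      simp [pvSkipC, List.drop_of_length_le hk']

theorem pv_qstr_drop (cs : List Char) : ∀ n k acc, cs.length - k ≤ n →
    pvQStr acc (cs.drop k) =
      (acc ++ (cs.drop k).take (pvStringEnd cs k - k), cs.drop (pvStringEnd cs k + 1)) := by
  intro n
  induction n with
  | zero =>
    intro k acc h
    have hk : cs.length ≤ k := by omega
    rw [List.drop_of_length_le hk, pvStringEnd, dif_neg (by omega)]
    simp [pvQStr_nil, List.drop_of_length_le (by omega : cs.length ≤ k + 1)]
  | succ n ih =>
    intro k acc h
    by_cases hk : k < cs.length
    · have hd : cs.drop k = cs[k] :: cs.drop (k + 1) := List.drop_eq_getElem_cons hk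
      rw [hd, pvQStr_cons, pvStringEnd]
      by_cases hq : cs[k] = '"'
      · rw [if_pos hq, dif_neg (by rw [pv_getD_pos cs k hk]; simp [hq])]
        simp
      · rw [if_neg hq, dif_pos ⟨hk, by rw [pv_getD_pos cs k hk]; simp [hq]⟩]
        by_cases hbs : cs[k] = '\\'
        · rw [if_pos hbs, if_pos (by rw [pv_getD_pos cs k hk]; simp [hbs])]
          by_cases hk1 : k + 1 < cs.length
          · have hd1 : cs.drop (k + 1) = cs[k + 1] :: cs.drop (k + 2) :=
              List.drop_eq_getElem_cons hk1
            rw [hd1]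
            show pvQStr (acc ++ ['\\', cs[k + 1]]) (List.drop (k + 2) cs) = _
            rw [ih (k + 2) (acc ++ ['\\', cs[k + 1]]) (by omega)]
            have hge := pvStringEnd_ge cs (cs.length - (k + 2)) (k + 2) le_rfl
            have h2 : pvStringEnd cs (k + 2) - k = (pvStringEnd cs (k + 2) - (k + 2)) + 2 := by
              omega
            rw [h2]
            simp only [List.take_succ_cons, List.append_assoc, List.cons_append,
              List.nil_append, Prod.mk.injEq, hbs]
          · have hd1 : cs.drop (k + 1) = [] :=
              List.drop_of_length_le (by omega)
            rw [hd1]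
            have hse : pvStringEnd cs (k + 2) = k + 2 := by
              rw [pvStringEnd, dif_neg (by omega)]
            rw [hse]
            simp [hbs, hd1, List.drop_of_length_le (by omega : cs.length ≤ k + 3)]
        · rw [if_neg hbs, if_neg (by rw [pv_getD_pos cs k hk]; simp [hbs])]
          rw [ih (k + 1) (acc ++ [cs[k]]) (by omega)]
          have hge := pvStringEnd_ge cs (cs.length - (k + 1)) (k + 1) le_rfl
          have h2 : pvStringEnd cs (k + 1) - k = (pvStringEnd cs (k + 1) - (k + 1)) + 1 := by
            omega
          rw [h2, List.take_succ_cons]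
          simp
    · have hk' : cs.length ≤ k := by omega
      rw [List.drop_of_length_le hk', pvStringEnd, dif_neg (by omega)]
      simp [pvQStr_nil, List.drop_of_length_le (by omega : cs.length ≤ k + 1)]

theorem pv_spanW_drop (cs : List Char) : ∀ n k, cs.length - k ≤ n →
    pvSpanW (cs.drop k) = ((cs.drop k).take (pvWordEnd cs k - k), cs.drop (pvWordEnd cs k)) := by
  intro n
  induction n with
  | zero =>
    intro k h
    have hk : cs.length ≤ k := by omega
    rw [List.drop_of_length_le hk, pvWordEnd, dif_neg (by omega)]
    simp [pvSpanW, List.drop_of_length_le hk]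
  | succ n ih =>
    intro k h
    by_cases hk : k < cs.length
    · have hd : cs.drop k = cs[k] :: cs.drop (k + 1) := List.drop_eq_getElem_cons hk
      rw [hd, pvSpanW, pvWordEnd]
      by_cases hdl : pvIsDelim cs[k]
      · rw [if_pos hdl, dif_neg (by rw [pv_getD_pos cs k hk]; simp [hdl])]
        simp only [Nat.sub_self, List.take_zero, ← hd]
      · rw [if_neg hdl,
            dif_pos ⟨hk, by rw [pv_getD_pos cs k hk]; exact Bool.eq_false_iff.mpr hdl⟩]
        have hge := pvWordEnd_ge cs (cs.length - (k + 1)) (k + 1) le_rfl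
        have h2 : pvWordEnd cs (k + 1) - k = (pvWordEnd cs (k + 1) - (k + 1)) + 1 := by omega
        rw [h2, ih (k + 1) (by omega), List.take_succ_cons]
    · have hk' : cs.length ≤ k := by omega
      rw [List.drop_of_length_le hk', pvWordEnd, dif_neg (by omega)]
      simp [pvSpanW, List.drop_of_length_le hk']

theorem pv_main (cs : List Char) : ∀ n i acc, cs.length - i ≤ n →
    pvTokA cs i acc = acc ++ pvTokB (cs.drop i) := by
  intro n
  induction n with
  | zero =>
    intro i acc h
    rw [pvTokA, dif_neg (by omega), List.drop_of_length_le (by omega), pvTokB]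
    simp
  | succ n ih =>
    intro i acc h
    by_cases hk : i < cs.length
    · have hd : cs.drop i = cs[i] :: cs.drop (i + 1) := List.drop_eq_getElem_cons hk
      rw [pvTokA, dif_pos hk, hd, pvTokB]
      simp only [pv_getD_pos cs i hk]
      by_cases hw : pvIsWS cs[i]
      · rw [dif_pos hw, if_pos hw]
        exact ih (i + 1) acc (by omega)
      · rw [dif_neg hw, if_neg hw]
        by_cases hc : cs[i] = '/' ∧ i + 1 < cs.length ∧ cs.getD (i + 1) ' ' = '/'
        · have hcB : cs[i] = '/' ∧ (cs.drop (i + 1)).head? = some '/' := by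
            refine ⟨hc.1, ?_⟩
            rw [List.head?_drop, List.getElem?_eq_getElem hc.2.1]
            rw [pv_getD_pos cs (i + 1) hc.2.1] at hc
            simp [hc.2.2]
          rw [dif_pos hc, if_pos hcB]
          rw [ih (pvCommentEnd cs i) acc
              (by have := pvCommentEnd_gt cs i hk
                    (by rw [pv_getD_pos cs i hk, hc.1]; decide); omega)]
          congr 1
          have hce : pvCommentEnd cs i = pvCommentEnd cs (i + 1) := by
            conv_lhs => rw [pvCommentEnd]
            rw [dif_pos ⟨hk, by rw [pv_getD_pos cs i hk, hc.1]; decide⟩]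
          rw [hce, ← pv_skipC_drop cs (cs.length - (i + 1)) (i + 1) le_rfl]
        · have hcB : ¬(cs[i] = '/' ∧ (cs.drop (i + 1)).head? = some '/') := by
            intro hx
            apply hc
            refine ⟨hx.1, ?_⟩
            rw [List.head?_drop] at hx
            obtain ⟨h1, h2⟩ := List.getElem?_eq_some_iff.mp hx.2
            exact ⟨h1, by rw [pv_getD_pos cs (i + 1) h1, h2]⟩
          rw [dif_neg hc, if_neg hcB]
          by_cases hq : cs[i] = '"'
          · rw [dif_pos hq, if_pos hq]
            rw [pv_qstr_drop cs (cs.length - (i + 1)) (i + 1) [] le_rfl]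
            have hge := pvStringEnd_ge cs (cs.length - (i + 1)) (i + 1) le_rfl
            rw [ih (pvStringEnd cs (i + 1) + 1) _ (by omega)]
            simp
          · rw [dif_neg hq, if_neg hq]
            by_cases hb : cs[i] = '{' ∨ cs[i] = '}'
            · rw [dif_pos hb, if_pos hb]
              rw [ih (i + 1) _ (by omega)]
              simp
            · rw [dif_neg hb, if_neg hb]
              have hdl : pvIsDelim cs[i] = false := by
                simp only [pvIsDelim, Bool.or_eq_false_iff, decide_eq_false_iff_not]
                refine ⟨⟨⟨by simpa using hw, hq⟩, ?_⟩, ?_⟩ <;> intro hx <;> exact hb (by simp [hx])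
              rw [pv_spanW_drop cs (cs.length - (i + 1)) (i + 1) le_rfl]
              have hge := pvWordEnd_ge cs (cs.length - (i + 1)) (i + 1) le_rfl
              rw [ih (pvWordEnd cs i) _
                  (by have := pvWordEnd_gt cs i hk (by rw [pv_getD_pos cs i hk]; exact hdl); omega)]
              have hwe : pvWordEnd cs i = pvWordEnd cs (i + 1) := by
                conv_lhs => rw [pvWordEnd, dif_pos ⟨hk, by rw [pv_getD_pos cs i hk]; exact hdl⟩]
              have h2 : pvWordEnd cs (i + 1) - i = (pvWordEnd cs (i + 1) - (i + 1)) + 1 := by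
                omega
              rw [hwe, h2, List.take_succ_cons]
              simp
    · rw [pvTokA, dif_neg hk, List.drop_of_length_le (by omega), pvTokB]
      simp

-- ===== VERDICT (by name: the statement is the Claim_ definition above) =====
theorem tokenize_vdf_py_spec : Claim_equal_tokenize_vdf_py := by
  intro text _
  unfold Spec_tokenize_vdf_py tokenize_vdf_py tokenize_vdf_py_alt
  simpa using pv_main text.toList text.toList.length 0 [] (by omega)
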